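-- pv_equiv track=rewrite | github.com/biopython/biopython | Bio/codecs/dna_2.py | _decode_nucleotides_from_byte
-- ===== SOURCE A (Python) =====
-- def _decode_nucleotide(byte: int) -> str:
--     return {
--         0b00: "T",
--         0b01: "C",
--         0b10: "A",
--         0b11: "G",
--     }[byte]
--
-- def _decode_nucleotides_from_byte(byte: int, is_last_byte: bool = False) -> str:
--     assert 0x0 <= byte <= 0xFF
--     nucleotide_count = byte & 0b11 if is_last_byte else 4
--     assert 0 <= nucleotide_count <= 4
--
--     nucleotides = []
--     bit_shifts = [6, 4, 2, 0][0:nucleotide_count]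
--
--     for bit_shift in bit_shifts:
--         nucleotide = _decode_nucleotide(byte >> bit_shift & 0b11)
--         nucleotides.append(nucleotide)
--
--     return "".join(nucleotides)
-- ===== SOURCE B (Python) =====
-- # B: precomputed 256-entry lookup table; decode = table lookup + slice (no per-nucleotide loop at call time).
-- _TABLE = [
--     "".join("TCAG"[b >> s & 0b11] for s in (6, 4, 2, 0))
--     for b in range(256)
-- ]
--
-- def _decode_nucleotides_from_byte(byte: int, is_last_byte: bool = False) -> str:
--     assert 0x0 <= byte <= 0xFF
--     nucleotide_count = byte & 0b11 if is_last_byte else 4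
--     assert 0 <= nucleotide_count <= 4
--     return _TABLE[byte][:nucleotide_count]
-- ===== Notes on version B (the rewrite author's own statement) =====
-- stated objective: idiomatic
-- what changed: Replaces the per-call bit-shift/dict-lookup loop with a module-level 256-entry precomputed table of fully decoded 4-char strings; the function becomes a table lookup plus a slice.
import Mathlib
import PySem

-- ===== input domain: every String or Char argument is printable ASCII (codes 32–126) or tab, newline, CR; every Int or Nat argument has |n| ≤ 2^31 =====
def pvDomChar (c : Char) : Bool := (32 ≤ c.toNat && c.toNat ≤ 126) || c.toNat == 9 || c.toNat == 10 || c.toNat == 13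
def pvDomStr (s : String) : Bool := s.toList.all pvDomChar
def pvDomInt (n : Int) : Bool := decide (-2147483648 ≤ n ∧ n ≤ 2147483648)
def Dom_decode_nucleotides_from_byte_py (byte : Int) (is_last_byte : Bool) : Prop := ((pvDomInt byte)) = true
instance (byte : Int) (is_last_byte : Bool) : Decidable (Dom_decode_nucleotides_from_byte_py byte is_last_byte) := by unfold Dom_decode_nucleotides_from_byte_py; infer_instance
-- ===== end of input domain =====

-- B replaces A's per-call bit-shift/dict-lookup loop by a precomputed 256-entry table plus a slice (idiomatic; return value only).

-- ===== PORT A =====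
-- dict literal {0:"T",1:"C",2:"A",3:"G"}[byte]; none = KeyError (never reached under Pre_)
def decode_nucleotide_py (byte : Int) : Option String :=
  PySem.Dict.get? (PySem.Dict.ofList [((0:Int), "T"), (1, "C"), (2, "A"), (3, "G")]) byte

def decode_nucleotides_from_byte_py (byte : Int) (is_last_byte : Bool) : String :=
  -- asserts: A raises AssertionError for byte outside [0,255]; Pre_ excludes those inputs
  let nucleotide_count : Int := if is_last_byte then PySem.Int.band byte 3 else 4
  let bit_shifts := PySem.List.slice ([6, 4, 2, 0] : List Int) (some 0) (some nucleotide_count)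
  -- byte >> s: shifts in the list are literals ≥ 0, so s.toNat is exact; '>>>' is Python's '>>' (see PYSEM.md)
  let nucleotides := bit_shifts.foldl (fun acc s =>
    match decode_nucleotide_py (PySem.Int.band (byte >>> s.toNat) 3) with
    | some n => acc ++ [n]
    | none => acc) ([] : List String)
  PySem.Str.join "" nucleotides

-- ===== PORT B =====
-- module-level table: "".join("TCAG"[b >> s & 3] for s in (6,4,2,0)) for b in range(256);
-- "TCAG"[i] never misses for b in range(256), so filterMap's skipped-none case is unreachable (totalization only)
def pvDecodeTable : List String :=
  (PySem.List.pyRange 0 256 1).map (fun b =>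
    String.ofList (([6, 4, 2, 0] : List Int).filterMap (fun s =>
      PySem.Str.pyGet? "TCAG" (PySem.Int.band (b >>> s.toNat) 3))))

def decode_nucleotides_from_byte_py_alt (byte : Int) (is_last_byte : Bool) : String :=
  let nucleotide_count : Int := if is_last_byte then PySem.Int.band byte 3 else 4
  -- _TABLE[byte]: in range under Pre_ (getD "" is totalization only)
  let row := (PySem.List.pyGet? pvDecodeTable byte).getD ""
  PySem.Str.slice row none (some nucleotide_count)

-- ===== PRECONDITION & SPEC =====
-- Pre_: exactly the inputs where A's assert 0 <= byte <= 0xFF passes (A raises AssertionError otherwise)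
def Pre_decode_nucleotides_from_byte_py (byte : Int) (is_last_byte : Bool) : Prop :=
  0 ≤ byte ∧ byte ≤ 255
instance (byte : Int) (is_last_byte : Bool) : Decidable (Pre_decode_nucleotides_from_byte_py byte is_last_byte) := by unfold Pre_decode_nucleotides_from_byte_py; infer_instance

def pvWitness_decode_nucleotides_from_byte_py : Int × Bool := (106, true)

def Spec_decode_nucleotides_from_byte_py (byte : Int) (is_last_byte : Bool) (out : String) : Prop := out = decode_nucleotides_from_byte_py_alt byte is_last_byte
instance (byte : Int) (is_last_byte : Bool) (out : String) : Decidable (Spec_decode_nucleotides_from_byte_py byte is_last_byte out) := by unfold Spec_decode_nucleotides_from_byte_py; infer_instance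

-- ===== CLAIM (what is proved, stated in full; the proofs are below) =====
def Claim_equal_decode_nucleotides_from_byte_py : Prop := ∀ (byte : Int) (is_last_byte : Bool), Dom_decode_nucleotides_from_byte_py byte is_last_byte → Pre_decode_nucleotides_from_byte_py byte is_last_byte → Spec_decode_nucleotides_from_byte_py byte is_last_byte (decode_nucleotides_from_byte_py byte is_last_byte)

-- ===== LEMMAS AND PROOFS =====
set_option maxHeartbeats 4000000 in
set_option maxRecDepth 40000 in
theorem pv_all_bytes : ∀ m : Nat, m < 256 → ∀ il : Bool,
    decode_nucleotides_from_byte_py (m : Int) il = decode_nucleotides_from_byte_py_alt (m : Int) il := by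
  decide

-- ===== VERDICT (by name: the statement is the Claim_ definition above) =====
theorem decode_nucleotides_from_byte_py_spec : Claim_equal_decode_nucleotides_from_byte_py := by
  intro byte il _ hpre
  obtain ⟨h0, h255⟩ := hpre
  have hb : byte = ((byte.toNat : Nat) : Int) := (Int.toNat_of_nonneg h0).symm
  have hlt : byte.toNat < 256 := by omega
  unfold Spec_decode_nucleotides_from_byte_py
  rw [hb]
  exact pv_all_bytes byte.toNat hlt il
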